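-- pv_equiv track=rewrite | github.com/pypi-data/pypi-mirror-291 | packages/riyazi/riyazi-0.17.1.tar.gz/riyazi-0.17.1/riyazi/ntheory/factors.py | NthComposite
-- ===== SOURCE A (Python) =====
-- def NthComposite(N):
--
-- 	# Sieve of prime numbers
-- 	IsPrime = [True]*1000005
--
-- 	# Iterate over the range [2, 1000005]
-- 	for p in range(2, 1000005):
-- 		if p * p > 1000005:
-- 			break
--
-- 		# If IsPrime[p] is true
-- 		if (IsPrime[p] == True):
--
-- 			# Iterate over the
-- 			# range [p * p, 1000005]
-- 			for i in range(p*p,1000005,p):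
-- 				IsPrime[i] = False
--
-- 	# Stores the list of composite numbers
-- 	Composites = []
--
-- 	# Iterate over the range [4, 1000005]
-- 	for p in range(4,1000005):
--
-- 		# If i is not prime
-- 		if (not IsPrime[p]):
-- 			Composites.append(p)
--
-- 	# Return Nth Composite Number
-- 	return Composites[N - 1]
-- ===== SOURCE B (Python) =====
-- def NthComposite(N):
--     # A number c >= 4 is composite iff it has a divisor d with 2 <= d and
--     # d*d <= c, so test each number individually by trial division (evens
--     # at once, then odd candidate divisors) instead of sieving a shared table.
--     def has_divisor(c):
--         if c % 2 == 0:
--             return True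
--         d = 3
--         while d * d <= c:
--             if c % d == 0:
--                 return True
--             d += 2
--         return False
--     comps = [c for c in range(4, 1000005) if has_divisor(c)]
--     return comps[N - 1]
-- ===== Notes on version B (the rewrite author's own statement) =====
-- stated objective: alternative
-- what changed: Replaces the Sieve of Eratosthenes (a shared boolean table marked by crossing off multiples of each surviving prime, then scanned for unmarked cells) by per-number trial division: each candidate is tested independently for a divisor (evens at once, then odd trial divisors d with d*d <= c), with no marking table at all.
import Mathlib
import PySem

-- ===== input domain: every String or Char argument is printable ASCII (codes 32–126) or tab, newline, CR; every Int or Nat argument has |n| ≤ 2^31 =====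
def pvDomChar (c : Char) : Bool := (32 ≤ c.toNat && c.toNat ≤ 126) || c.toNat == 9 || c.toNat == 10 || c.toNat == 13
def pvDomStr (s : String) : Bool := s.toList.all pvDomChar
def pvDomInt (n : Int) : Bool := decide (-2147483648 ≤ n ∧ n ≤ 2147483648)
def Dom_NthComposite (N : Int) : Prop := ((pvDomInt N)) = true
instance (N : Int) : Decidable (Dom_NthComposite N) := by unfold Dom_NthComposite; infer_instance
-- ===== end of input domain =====

-- B replaces A's Sieve of Eratosthenes (shared boolean table, multiples crossed off, unmarked
-- cells scanned out) by per-number trial division (each candidate tested independently for a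
-- divisor d with d*d <= c); a different algorithm of similar cost, same value on all admitted inputs.


-- ===== PORT A =====
-- inner loop `for i in range(p*p, 1000005, p): IsPrime[i] = False` (indices always in bounds,
-- so setIfInBounds is exact; the fuel only makes the recursion total and is never exhausted)
def pvMarkA (fuel p i : Nat) (arr : Array Bool) : Array Bool :=
  match fuel with
  | 0 => arr
  | f + 1 => if i < 1000005 then pvMarkA f p (i + p) (arr.setIfInBounds i false) else arr

-- outer loop `for p in range(2, 1000005): if p*p > 1000005: break; if IsPrime[p]: …`
def pvSieveA (fuel p : Nat) (arr : Array Bool) : Array Bool :=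
  match fuel with
  | 0 => arr
  | f + 1 =>
    if p < 1000005 then
      if 1000005 < p * p then arr
      else pvSieveA f (p + 1) (if arr.getD p true then pvMarkA 1000005 p (p * p) arr else arr)
    else arr

def pvIsPrimeA : Array Bool := pvSieveA 1000005 2 (Array.replicate 1000005 true)

-- `Composites = [p for p in range(4, 1000005) if not IsPrime[p]]` (reads always in bounds)
def pvCompositesA : List Int :=
  ((List.range' 4 1000001).filter (fun p => !(pvIsPrimeA.getD p true))).map (fun p => (p : Int))

def NthComposite (N : Int) : Int :=
  (PySem.List.pyGet? pvCompositesA (N - 1)).getD 0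

-- ===== PORT B =====
-- `while d*d <= c: if c % d == 0: return True; d += 2; return False` — all values are
-- non-negative naturals, so Nat `%` is exact; the fuel only makes the recursion total
-- and is never exhausted on the indices the comprehension supplies
def pvTrialOddB (fuel d c : Nat) : Bool :=
  match fuel with
  | 0 => false
  | f + 1 => if d * d ≤ c then (if c % d = 0 then true else pvTrialOddB f (d + 2) c) else false

-- `if c % 2 == 0: return True` then the odd-divisor loop from 3
def pvHasDivB (c : Nat) : Bool :=
  if c % 2 = 0 then true else pvTrialOddB 501 3 c

-- `comps = [c for c in range(4, 1000005) if has_divisor(c)]`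
def pvCompsB : List Int :=
  ((List.range' 4 1000001).filter (fun c => pvHasDivB c)).map (fun c => (c : Int))

def NthComposite_alt (N : Int) : Int :=
  (PySem.List.pyGet? pvCompsB (N - 1)).getD 0

-- ===== PRECONDITION & SPEC =====
-- Pre_ excludes exactly the N on which A raises IndexError: A's table holds 921504 composites,
-- and Python's negative indexing makes A return precisely for -921503 ≤ N ≤ 921504 (B indexes a
-- same-length list, so it raises on exactly the same inputs).
def Pre_NthComposite (N : Int) : Prop := -921503 ≤ N ∧ N ≤ 921504
instance (N : Int) : Decidable (Pre_NthComposite N) := by unfold Pre_NthComposite; infer_instance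
def pvWitness_NthComposite : Int := 5

def Spec_NthComposite (N : Int) (out : Int) : Prop := out = NthComposite_alt N
instance (N : Int) (out : Int) : Decidable (Spec_NthComposite N out) := by unfold Spec_NthComposite; infer_instance

-- ===== CLAIM (what is proved, stated in full; the proofs are below) =====
def Claim_equal_NthComposite : Prop :=
  ∀ (N : Int), Dom_NthComposite N → Pre_NthComposite N → Spec_NthComposite N (NthComposite N)

-- ===== LEMMAS AND PROOFS =====

theorem pv_getD_lt (a : Array Bool) (j : Nat) (d : Bool) (h : j < a.size) :
    a.getD j d = a[j] := by simp [Array.getD, h]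

-- `getD` on an in-bounds write
theorem pv_getD_setIfInBounds (a : Array Bool) (i j : Nat) (v d : Bool) (hi : i < a.size) :
    (a.setIfInBounds i v).getD j d = if j = i then v else a.getD j d := by
  by_cases hj : j < a.size
  · have hj' : j < (a.setIfInBounds i v).size := by simpa [Array.size_setIfInBounds] using hj
    rw [pv_getD_lt (a.setIfInBounds i v) j d hj', pv_getD_lt a j d hj,
      Array.getElem_setIfInBounds hj]
    by_cases h : i = j
    · rw [if_pos h, if_pos h.symm]
    · rw [if_neg h, if_neg (fun hh => h hh.symm)]
  · have hj' : ¬ j < (a.setIfInBounds i v).size := by simpa [Array.size_setIfInBounds] using hj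
    have hne : ¬ j = i := by omega
    simp [Array.getD, hj, hne]

theorem pv_getD_replicate (n j : Nat) (v d : Bool) (h : j < n) :
    (Array.replicate n v).getD j d = v := by
  have h' : j < (Array.replicate n v).size := by simpa [Array.size_replicate] using h
  rw [pv_getD_lt _ _ _ h', Array.getElem_replicate]

theorem pvMarkA_size (f p i : Nat) (a : Array Bool) : (pvMarkA f p i a).size = a.size := by
  induction f generalizing i a with
  | zero => rfl
  | succ f ih =>
    unfold pvMarkA
    split
    · rw [ih, Array.size_setIfInBounds]
    · rfl

-- what the inner marking loop writes: every p-th cell from i on, below 1000005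
theorem pvMarkA_getD (f p i j : Nat) (a : Array Bool) (d : Bool) (hp : 1 ≤ p)
    (hf : 1000005 ≤ i + f) (hs : a.size = 1000005) :
    (pvMarkA f p i a).getD j d =
      if i ≤ j ∧ j < 1000005 ∧ p ∣ (j - i) then false else a.getD j d := by
  induction f generalizing i a with
  | zero =>
    rw [if_neg]
    · rfl
    · rintro ⟨h1, h2, -⟩; omega
  | succ f ih =>
    unfold pvMarkA
    by_cases hi : i < 1000005
    · rw [if_pos hi]
      rw [ih (i + p) _ (by omega) (by rw [Array.size_setIfInBounds, hs])]
      rw [pv_getD_setIfInBounds _ _ _ _ _ (by omega)]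
      by_cases hc : i ≤ j ∧ j < 1000005 ∧ p ∣ (j - i)
      · rw [if_pos hc]
        by_cases hji : j = i
        · rw [if_neg (by rintro ⟨h1, -, -⟩; omega), if_pos hji]
        · obtain ⟨h1, h2, t, ht⟩ := hc
          have ht1 : 1 ≤ t := by
            rcases Nat.eq_zero_or_pos t with h | h
            · subst h; rw [Nat.mul_zero] at ht; omega
            · exact h
          have hpt : p * t = p * (t - 1) + p := by
            rw [Nat.mul_sub, Nat.mul_one]
            have : p ≤ p * t := by calc p = p * 1 := (Nat.mul_one p).symm
                                       _ ≤ p * t := Nat.mul_le_mul_left p ht1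
            omega
          rw [if_pos ⟨by omega, h2, t - 1, by omega⟩]
      · rw [if_neg hc, if_neg, if_neg]
        · intro hji
          exact hc ⟨by omega, by omega, by simp [hji]⟩
        · rintro ⟨h1, h2, t, ht⟩
          have hpt : p * (t + 1) = p * t + p := by rw [Nat.mul_add, Nat.mul_one]
          exact hc ⟨by omega, h2, t + 1, by omega⟩
    · rw [if_neg hi, if_neg]
      rintro ⟨h1, h2, -⟩; omega

-- A's outer loop: running from q with the Eratosthenes invariant ends with exactly the numbers
-- having a prime divisor p with p*p ≤ j marked
theorem pvSieveA_getD (f q : Nat) (a : Array Bool) (hq : 2 ≤ q) (hq2 : q ≤ 1001)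
    (hf : 1001 ≤ q + f) (hs : a.size = 1000005)
    (hinv : ∀ j d, j < 1000005 →
      (a.getD j d = false ↔ ∃ p, Nat.Prime p ∧ p < q ∧ p ∣ j ∧ p * p ≤ j)) :
    ∀ j d, j < 1000005 →
      ((pvSieveA f q a).getD j d = false ↔ ∃ p, Nat.Prime p ∧ p ∣ j ∧ p * p ≤ j) := by
  induction f generalizing q a with
  | zero =>
    intro j d hj
    have hq1001 : q = 1001 := by omega
    rw [pvSieveA, hinv j d hj]
    constructor
    · rintro ⟨p, hp, -, h3, h4⟩; exact ⟨p, hp, h3, h4⟩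
    · rintro ⟨p, hp, h3, h4⟩
      refine ⟨p, hp, ?_, h3, h4⟩
      have : p * p < 1001 * 1001 := by omega
      by_contra h; push_neg at h
      have : 1001 * 1001 ≤ p * p := Nat.mul_le_mul (by omega) (by omega)
      omega
  | succ f ih =>
    intro j d hj
    rw [pvSieveA, if_pos (by omega : q < 1000005)]
    by_cases hbr : 1000005 < q * q
    · rw [if_pos hbr, hinv j d hj]
      have hq1001 : q = 1001 := by
        have : 1000 * 1000 ≤ 1000005 := by norm_num
        have hq1 : 1001 ≤ q := by
          by_contra h; push_neg at h
          have : q * q ≤ 1000 * 1000 := Nat.mul_le_mul (by omega) (by omega)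
          omega
        omega
      constructor
      · rintro ⟨p, hp, -, h3, h4⟩; exact ⟨p, hp, h3, h4⟩
      · rintro ⟨p, hp, h3, h4⟩
        refine ⟨p, hp, ?_, h3, h4⟩
        by_contra h; push_neg at h
        have : 1001 * 1001 ≤ p * p := Nat.mul_le_mul (by omega) (by omega)
        omega
    · rw [if_neg hbr]
      push_neg at hbr
      have hqle : q ≤ 1000 := by
        by_contra h; push_neg at h
        have : 1001 * 1001 ≤ q * q := Nat.mul_le_mul (by omega) (by omega)
        omega
      by_cases hqp : Nat.Prime q
      · -- q is still marked prime: it marks its multiples from q*q on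
        have hqt : a.getD q true = true := by
          rcases Bool.eq_false_or_eq_true (a.getD q true) with h | h
          · exact h
          · exfalso
            obtain ⟨p, hp, hplt, hpd, -⟩ := (hinv q true (by omega)).1 h
            have := (Nat.Prime.eq_one_or_self_of_dvd hqp p hpd)
            have h2 := hp.two_le
            omega
        rw [if_pos hqt]
        refine ih (q + 1) _ (by omega) (by omega) (by omega)
          (by rw [pvMarkA_size, hs]) ?_ j d hj
        intro j' d' hj'
        rw [pvMarkA_getD 1000005 q (q * q) j' a d' (by omega) (by omega) hs]
        by_cases hc : q * q ≤ j' ∧ j' < 1000005 ∧ q ∣ (j' - q * q)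
        · rw [if_pos hc]
          obtain ⟨h1, h2, h3⟩ := hc
          have hqdvd : q ∣ j' := by
            have := Nat.dvd_add h3 (dvd_mul_right q q)
            rwa [Nat.sub_add_cancel h1] at this
          simp only [true_iff]
          exact ⟨q, hqp, by omega, hqdvd, h1⟩
        · rw [if_neg hc, hinv j' d' hj']
          constructor
          · rintro ⟨p, hp, hplt, hpd, hpj⟩; exact ⟨p, hp, by omega, hpd, hpj⟩
          · rintro ⟨p, hp, hplt, hpd, hpj⟩
            by_cases hpq : p = q
            · exfalso
              subst hpq
              exact hc ⟨hpj, hj', Nat.dvd_sub hpd (dvd_mul_right p p)⟩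
            · exact ⟨p, hp, by omega, hpd, hpj⟩
      · -- q is composite: already marked, nothing happens
        have hqf : a.getD q true = false := by
          have h1 : q ≠ 1 := by omega
          have hm := Nat.minFac_prime h1
          have hmd := Nat.minFac_dvd q
          have hsq : q.minFac * q.minFac ≤ q := by
            have := Nat.minFac_sq_le_self (show 0 < q by omega) hqp
            rwa [pow_two] at this
          have h2 := hm.two_le
          have hmlt : q.minFac < q := by nlinarith
          exact (hinv q true (by omega)).2 ⟨q.minFac, hm, hmlt, hmd, hsq⟩
        rw [if_neg (by simp [hqf])]
        refine ih (q + 1) a (by omega) (by omega) (by omega) hs ?_ j d hj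
        intro j' d' hj'
        rw [hinv j' d' hj']
        constructor
        · rintro ⟨p, hp, hplt, hpd, hpj⟩; exact ⟨p, hp, by omega, hpd, hpj⟩
        · rintro ⟨p, hp, hplt, hpd, hpj⟩
          by_cases hpq : p = q
          · exact absurd (hpq ▸ hp) hqp
          · exact ⟨p, hp, by omega, hpd, hpj⟩

-- the two characterizations agree: a number has a PRIME divisor p with p*p ≤ it
-- iff it has ANY divisor p ≥ 2 with p*p ≤ it
theorem pv_bridge (j : Nat) :
    (∃ p, Nat.Prime p ∧ p ∣ j ∧ p * p ≤ j) ↔ (∃ p, 2 ≤ p ∧ p ∣ j ∧ p * p ≤ j) := by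
  constructor
  · rintro ⟨p, hp, h1, h2⟩; exact ⟨p, hp.two_le, h1, h2⟩
  · rintro ⟨p, hp2, hpd, hpj⟩
    have hj4 : 4 ≤ j := by nlinarith
    have hjnp : ¬ Nat.Prime j := by
      intro hj
      rcases (Nat.Prime.eq_one_or_self_of_dvd hj p hpd) with h | h
      · omega
      · nlinarith
    have hm := Nat.minFac_prime (show j ≠ 1 by omega)
    have hmd := Nat.minFac_dvd j
    have hsq : j.minFac * j.minFac ≤ j := by
      have := Nat.minFac_sq_le_self (show 0 < j by omega) hjnp
      rwa [pow_two] at this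
    exact ⟨j.minFac, hm, hmd, hsq⟩

theorem pvIsPrimeA_getD (j : Nat) (d : Bool) (hj : j < 1000005) :
    (pvIsPrimeA.getD j d = false ↔ ∃ p, 2 ≤ p ∧ p ∣ j ∧ p * p ≤ j) := by
  rw [← pv_bridge]
  refine pvSieveA_getD 1000005 2 _ (by norm_num) (by norm_num) (by norm_num)
    (by rw [Array.size_replicate]) ?_ j d hj
  intro j' d' hj'
  rw [pv_getD_replicate _ _ _ _ hj']
  simp only [Bool.true_eq_false, false_iff]
  rintro ⟨p, hp, hplt, -, -⟩
  have := hp.two_le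
  omega

-- B's odd trial loop from d, under the invariant that no divisor below d qualifies,
-- decides exactly "some divisor e ≥ 2 with e*e ≤ c divides c" (c odd)
theorem pvTrialOddB_correct (fuel : Nat) : ∀ (d c : Nat), 3 ≤ d → d % 2 = 1 → c % 2 = 1 →
    c < 1000005 → 1003 ≤ d + 2 * fuel →
    (∀ e, 2 ≤ e → e < d → ¬ (e ∣ c ∧ e * e ≤ c)) →
    (pvTrialOddB fuel d c = true ↔ ∃ e, 2 ≤ e ∧ e ∣ c ∧ e * e ≤ c) := by
  induction fuel with
  | zero =>
    intro d c hd hdo hco hc hf hinv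
    simp only [pvTrialOddB, Bool.false_eq_true, false_iff]
    rintro ⟨e, he2, hed, hee⟩
    by_cases h : e < d
    · exact hinv e he2 h ⟨hed, hee⟩
    · push_neg at h
      have : 1003 * 1003 ≤ e * e := Nat.mul_le_mul (by omega) (by omega)
      omega
  | succ f ih =>
    intro d c hd hdo hco hc hf hinv
    unfold pvTrialOddB
    by_cases hdd : d * d ≤ c
    · rw [if_pos hdd]
      by_cases hm : c % d = 0
      · rw [if_pos hm]
        simp only [true_iff]
        exact ⟨d, by omega, Nat.dvd_of_mod_eq_zero hm, hdd⟩
      · rw [if_neg hm]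
        refine ih (d + 2) c (by omega) (by omega) hco hc (by omega) ?_
        intro e he2 hed
        by_cases h : e < d
        · exact hinv e he2 h
        · rintro ⟨hdv, -⟩
          by_cases h1 : e = d
          · subst h1
            exact hm (Nat.dvd_iff_mod_eq_zero.mp hdv)
          · -- e = d + 1 is even, yet it divides the odd c
            have h2e : (2 : Nat) ∣ e := by omega
            have h2c : (2 : Nat) ∣ c := h2e.trans hdv
            omega
    · rw [if_neg hdd]
      simp only [Bool.false_eq_true, false_iff]
      rintro ⟨e, he2, hed, hee⟩
      by_cases h : e < d
      · exact hinv e he2 h ⟨hed, hee⟩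
      · push_neg at h
        have : d * d ≤ e * e := Nat.mul_le_mul h h
        omega

-- the whole test: evens ≥ 4 are composite via the divisor 2, odds via the loop
theorem pvHasDivB_correct (c : Nat) (h4 : 4 ≤ c) (hc : c < 1000005) :
    (pvHasDivB c = true ↔ ∃ e, 2 ≤ e ∧ e ∣ c ∧ e * e ≤ c) := by
  unfold pvHasDivB
  by_cases he : c % 2 = 0
  · rw [if_pos he]
    simp only [true_iff]
    exact ⟨2, le_refl 2, Nat.dvd_of_mod_eq_zero he, by omega⟩
  · rw [if_neg he]
    refine pvTrialOddB_correct 501 3 c (by norm_num) (by norm_num) (by omega) hc (by omega) ?_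
    rintro e he2 hed ⟨hdv, -⟩
    have h2 : e = 2 := by omega
    subst h2
    omega

-- pointwise: A's cell is unmarked-prime exactly where B's trial division finds a divisor
theorem pv_cells (j : Nat) (hj4 : 4 ≤ j) (hj : j < 1000005) :
    (!(pvIsPrimeA.getD j true)) = pvHasDivB j := by
  have hB := pvHasDivB_correct j hj4 hj
  rcases Bool.eq_false_or_eq_true (pvHasDivB j) with h | h
  · rw [h]
    have hA : pvIsPrimeA.getD j true = false :=
      (pvIsPrimeA_getD j true hj).2 (hB.1 h)
    rw [hA]; rfl
  · rw [h]
    have hA : ¬ pvIsPrimeA.getD j true = false := by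
      intro hf
      have := hB.2 ((pvIsPrimeA_getD j true hj).1 hf)
      rw [h] at this
      exact Bool.false_ne_true this
    rcases Bool.eq_false_or_eq_true (pvIsPrimeA.getD j true) with h2 | h2
    · rw [h2]; rfl
    · exact absurd h2 hA

theorem pv_lists_eq : pvCompositesA = pvCompsB := by
  unfold pvCompositesA pvCompsB
  have hcongr : (List.range' 4 1000001).filter (fun p => !(pvIsPrimeA.getD p true)) =
      (List.range' 4 1000001).filter (fun c => pvHasDivB c) := by
    refine List.filter_congr ?_
    intro a ha
    have := List.mem_range'_1.1 ha
    exact pv_cells a (by omega) (by omega)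
  rw [hcongr]

-- ===== VERDICT (by name: the statement is the Claim_ definition above) =====
theorem NthComposite_spec : Claim_equal_NthComposite := by
  intro N _ _
  unfold Spec_NthComposite NthComposite NthComposite_alt
  rw [pv_lists_eq]
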